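-- pv_equiv track=rewrite | github.com/gowthameaswar/crion-rest-api | Q2.py | chng
-- ===== SOURCE A (Python) =====
-- def chng(result):
--     num = 0
--     for ch in result:
--         if ch == '0':
--             num *= 10
--         else:
--             num = (num * 10) + 1
--     return num
-- ===== SOURCE B (Python) =====
-- def chng(result):
--     # Right-to-left pass: add the power of ten at each nonzero position.
--     total = 0
--     p = 1
--     for ch in reversed(result):
--         if ch != '0':
--             total += p
--         p *= 10
--     return total
-- ===== Notes on version B (the rewrite author's own statement) =====
-- stated objective: alternative
-- what changed: Replaces left-to-right Horner multiply-add accumulation with a right-to-left pass that keeps a power-of-ten accumulator and adds it at each nonzero character.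
import Mathlib
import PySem

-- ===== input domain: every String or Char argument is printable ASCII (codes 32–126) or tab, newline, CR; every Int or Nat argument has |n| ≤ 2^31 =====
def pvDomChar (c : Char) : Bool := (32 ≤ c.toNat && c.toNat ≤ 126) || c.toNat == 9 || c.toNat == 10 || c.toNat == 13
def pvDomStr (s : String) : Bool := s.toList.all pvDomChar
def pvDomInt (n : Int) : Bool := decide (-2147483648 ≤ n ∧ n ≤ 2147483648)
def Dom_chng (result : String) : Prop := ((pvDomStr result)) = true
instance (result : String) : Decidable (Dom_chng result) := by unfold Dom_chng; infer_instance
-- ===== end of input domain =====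

-- B replaces A's left-to-right Horner accumulation with a right-to-left pass
-- that maintains a power-of-ten accumulator (alternative decomposition, same cost).

-- ===== PORT A =====
def chng (result : String) : Int :=
  result.toList.foldl (fun num ch => if ch = '0' then num * 10 else num * 10 + 1) 0

-- ===== PORT B =====
def chng_alt (result : String) : Int :=
  (result.toList.reverse.foldl
    (fun (tp : Int × Int) ch => (if ch ≠ '0' then tp.1 + tp.2 else tp.1, tp.2 * 10))
    (0, 1)).1

-- ===== PRECONDITION & SPEC =====
def Spec_chng (result : String) (out : Int) : Prop := out = chng_alt result
instance (result : String) (out : Int) : Decidable (Spec_chng result out) := by unfold Spec_chng; infer_instance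

-- ===== CLAIM (what is proved, stated in full; the proofs are below) =====
def Claim_equal_chng : Prop := ∀ (result : String), Dom_chng result → Spec_chng result (chng result)

-- ===== LEMMAS AND PROOFS =====

def pvBit (c : Char) : Int := if c = '0' then 0 else 1

-- value of a list read least-significant-first
def pvVr : List Char → Int
  | [] => 0
  | c :: m => pvBit c + 10 * pvVr m

theorem pvB_fold (m : List Char) : ∀ (t p : Int),
    m.foldl (fun (tp : Int × Int) ch => (if ch ≠ '0' then tp.1 + tp.2 else tp.1, tp.2 * 10)) (t, p)
      = (t + p * pvVr m, p * (10 : Int) ^ m.length) := by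
  induction m with
  | nil => intro t p; simp [pvVr]
  | cons c m ih =>
    intro t p
    simp only [List.foldl_cons, List.length_cons, pvVr, ih]
    by_cases h : c = '0' <;>
      simp only [h, pvBit, ne_eq, not_true_eq_false, not_false_iff, if_true, if_false,
        Prod.mk.injEq] <;>
      constructor <;> ring

theorem pvVr_append (m : List Char) (c : Char) :
    pvVr (m ++ [c]) = pvVr m + pvBit c * (10 : Int) ^ m.length := by
  induction m with
  | nil => simp [pvVr]
  | cons d m ih => simp [pvVr, ih]; ring

theorem pvA_fold (l : List Char) : ∀ (n : Int),
    l.foldl (fun num ch => if ch = '0' then num * 10 else num * 10 + 1) n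
      = n * (10 : Int) ^ l.length + pvVr l.reverse := by
  induction l with
  | nil => intro n; simp [pvVr]
  | cons c l ih =>
    intro n
    simp only [List.foldl_cons, List.length_cons, List.reverse_cons, ih, pvVr_append,
      List.length_reverse]
    by_cases h : c = '0' <;> simp [h, pvBit] <;> ring

-- ===== VERDICT (by name: the statement is the Claim_ definition above) =====
theorem chng_spec : Claim_equal_chng := by
  intro result _
  unfold Spec_chng chng chng_alt
  rw [pvA_fold, pvB_fold]
  simp
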